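-- pv_equiv track=rewrite | github.com/thehalleyyoung/deppy | src/deppy/hybrid/mixed_mode/compiler.py | _python_type_to_lean
-- ===== SOURCE A (Python) =====
-- def _python_type_to_lean(type_str: str) -> str:
--     """Best-effort mapping from Python type annotation to Lean type."""
--     mapping = {
--         "int": "Int",
--         "float": "Float",
--         "str": "String",
--         "bool": "Bool",
--         "None": "Unit",
--         "Any": "α",
--         "List": "List",
--         "Dict": "HashMap",
--         "Set": "Finset",
--         "Tuple": "Prod",
--         "Optional": "Option",
--     }
--     # Strip Optional[...]
--     if type_str.startswith("Optional[") and type_str.endswith("]"):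
--         inner = type_str[9:-1]
--         return f"Option {_python_type_to_lean(inner)}"
--     # Strip List[...]
--     if type_str.startswith("List[") and type_str.endswith("]"):
--         inner = type_str[5:-1]
--         return f"List {_python_type_to_lean(inner)}"
--     return mapping.get(type_str, type_str)
-- ===== SOURCE B (Python) =====
-- def _python_type_to_lean(type_str: str) -> str:
--     """Best-effort mapping from Python type annotation to Lean type.
--
--     Index-based: walk a shrinking window [i, j) over the string, emitting each
--     wrapper's Lean name into a growing prefix, then translate the core."""
--     mapping = {
--         "int": "Int",
--         "float": "Float",
--         "str": "String",
--         "bool": "Bool",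
--         "None": "Unit",
--         "Any": "α",
--         "List": "List",
--         "Dict": "HashMap",
--         "Set": "Finset",
--         "Tuple": "Prod",
--         "Optional": "Option",
--     }
--     i, j = 0, len(type_str)
--     prefix = ""
--     while True:
--         if type_str.endswith("]", i, j) and type_str.startswith("Optional[", i, j):
--             prefix += "Option "
--             i, j = i + 9, j - 1
--         elif type_str.endswith("]", i, j) and type_str.startswith("List[", i, j):
--             prefix += "List "
--             i, j = i + 5, j - 1
--         else:
--             break
--     core = type_str[i:j]
--     return prefix + mapping.get(core, core)
-- ===== Notes on version B (the rewrite author's own statement) =====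
-- stated objective: alternative
-- what changed: Replaces A's self-recursion with per-layer substring slicing by an iterative index scan: a shrinking window [i, j) over the unchanged string, a forward-built prefix accumulator (no stack, no back-to-front reassembly), and one mapping lookup on the final core.
import Mathlib
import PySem

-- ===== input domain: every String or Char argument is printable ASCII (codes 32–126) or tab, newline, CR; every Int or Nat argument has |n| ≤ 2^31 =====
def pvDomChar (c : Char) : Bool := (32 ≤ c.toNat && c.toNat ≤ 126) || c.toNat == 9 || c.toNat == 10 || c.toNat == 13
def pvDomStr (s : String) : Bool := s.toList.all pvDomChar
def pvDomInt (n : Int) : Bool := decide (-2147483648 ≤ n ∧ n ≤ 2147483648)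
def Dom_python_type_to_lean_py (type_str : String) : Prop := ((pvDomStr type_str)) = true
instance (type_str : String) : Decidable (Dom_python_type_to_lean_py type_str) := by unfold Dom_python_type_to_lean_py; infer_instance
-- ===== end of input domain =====

-- B replaces A's slicing recursion by an index-based scan: a shrinking window [i, j) over the
-- unchanged string, a forward-built prefix accumulator, and a String-keyed mapping lookup at the
-- end (objective: alternative decomposition).

-- ===== PORT A =====

-- termination helper for port A: peeling `s[a:-1]` off a nonempty string with 0 < a shrinks it
theorem pvSliceLenLt (cs : List Char) (a : Int) (ha : 0 < a) (h : 0 < cs.length) :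
    (PySem.List.slice cs (some a) (some (-1))).length < cs.length := by
  have hc : 1 ≤ PySem.List.clampIdx cs.length a := by
    simp only [PySem.List.clampIdx]
    split
    · omega
    · omega
  simp only [PySem.List.slice, List.length_take, List.length_drop]
  omega

theorem pvStartsLen {cs : List Char} {p : List Char} (h : PySem.Chars.startswith cs p = true) :
    p.length ≤ cs.length := by
  simp only [PySem.Chars.startswith, List.isPrefixOf_iff_prefix] at h
  exact h.length_le

def pyMappingA : PySem.Dict (List Char) (List Char) :=
  ⟨[("int".toList, "Int".toList), ("float".toList, "Float".toList), ("str".toList, "String".toList),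
    ("bool".toList, "Bool".toList), ("None".toList, "Unit".toList), ("Any".toList, "α".toList),
    ("List".toList, "List".toList), ("Dict".toList, "HashMap".toList), ("Set".toList, "Finset".toList),
    ("Tuple".toList, "Prod".toList), ("Optional".toList, "Option".toList)]⟩

-- A's recursion, literally: strip Optional[...], strip List[...], else mapping.get(s, s)
def pvARec (cs : List Char) : List Char :=
  if PySem.Chars.startswith cs "Optional[".toList && PySem.Chars.endswith cs "]".toList then
    "Option ".toList ++ pvARec (PySem.List.slice cs (some 9) (some (-1)))
  else if PySem.Chars.startswith cs "List[".toList && PySem.Chars.endswith cs "]".toList then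
    "List ".toList ++ pvARec (PySem.List.slice cs (some 5) (some (-1)))
  else
    PySem.Dict.getD pyMappingA cs cs
termination_by cs.length
decreasing_by
  · rename_i hh; have h1 := (Bool.and_eq_true ..).mp hh
    exact pvSliceLenLt cs 9 (by norm_num) (lt_of_lt_of_le (by decide) (pvStartsLen h1.1))
  · rename_i hh; have h1 := (Bool.and_eq_true ..).mp hh
    exact pvSliceLenLt cs 5 (by norm_num) (lt_of_lt_of_le (by decide) (pvStartsLen h1.1))

def python_type_to_lean_py (type_str : String) : String :=
  String.ofList (pvARec type_str.toList)

-- ===== PORT B =====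

def pyMappingB : PySem.Dict String String :=
  ⟨[("int", "Int"), ("float", "Float"), ("str", "String"), ("bool", "Bool"), ("None", "Unit"),
    ("Any", "α"), ("List", "List"), ("Dict", "HashMap"), ("Set", "Finset"), ("Tuple", "Prod"),
    ("Optional", "Option")]⟩

-- the while loop over the window [i, j): `s.endswith("]", i, j)` is `i < j ∧ s[j-1] = ']'`,
-- `s.startswith(p, i, j)` is `i + |p| ≤ j ∧ s[i : i+|p|] = p`; returns (prefix, core = s[i:j])
def pvBScan (cs : List Char) (i j : Nat) (pre : List Char) : List Char × List Char :=
  if i < j ∧ cs[j-1]? = some ']' ∧ i + 9 ≤ j ∧ (cs.drop i).take 9 = "Optional[".toList then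
    pvBScan cs (i + 9) (j - 1) (pre ++ "Option ".toList)
  else if i < j ∧ cs[j-1]? = some ']' ∧ i + 5 ≤ j ∧ (cs.drop i).take 5 = "List[".toList then
    pvBScan cs (i + 5) (j - 1) (pre ++ "List ".toList)
  else
    (pre, (cs.drop i).take (j - i))
termination_by j - i
decreasing_by
  all_goals (rename_i h; obtain ⟨_, _, h3, _⟩ := h; omega)

def python_type_to_lean_py_alt (type_str : String) : String :=
  let p := pvBScan type_str.toList 0 type_str.toList.length []
  String.ofList p.1 ++ PySem.Dict.getD pyMappingB (String.ofList p.2) (String.ofList p.2)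

-- ===== PRECONDITION & SPEC =====
def Spec_python_type_to_lean_py (type_str : String) (out : String) : Prop := out = python_type_to_lean_py_alt type_str
instance (type_str : String) (out : String) : Decidable (Spec_python_type_to_lean_py type_str out) := by unfold Spec_python_type_to_lean_py; infer_instance

-- ===== CLAIM (what is proved, stated in full; the proofs are below) =====
def Claim_equal_python_type_to_lean_py : Prop := ∀ (type_str : String), Dom_python_type_to_lean_py type_str → Spec_python_type_to_lean_py type_str (python_type_to_lean_py type_str)

-- ===== LEMMAS AND PROOFS =====

-- A's wrapper test on the window substring equals B's index-based test
theorem pvWindowCond (cs : List Char) (i j : Nat) (P : List Char)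
    (hij : i ≤ j) (hj : j ≤ cs.length) :
    ((PySem.Chars.startswith ((cs.drop i).take (j - i)) P
        && PySem.Chars.endswith ((cs.drop i).take (j - i)) "]".toList) = true)
      ↔ (i < j ∧ cs[j-1]? = some ']' ∧ i + P.length ≤ j ∧ (cs.drop i).take P.length = P) := by
  have hlen : ((cs.drop i).take (j - i)).length = j - i := by
    simp [List.length_take, List.length_drop]; omega
  rw [Bool.and_eq_true, PySem.Chars.startswith_iff, PySem.Chars.endswith_iff]
  have hsuf : ("]".toList <:+ (cs.drop i).take (j - i)) ↔ (i < j ∧ cs[j-1]? = some ']') := by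
    constructor
    · rintro ⟨t, ht⟩
      have hne : (cs.drop i).take (j - i) ≠ [] := by
        intro h0; rw [h0] at ht; simpa using congrArg List.length ht
      have hij' : i < j := by
        by_contra hc
        apply hne; rw [show j - i = 0 by omega]; simp
      refine ⟨hij', ?_⟩
      have : ((cs.drop i).take (j - i)).getLast? = some ']' := by
        rw [← ht]; simp
      rw [List.getLast?_eq_getElem?, hlen] at this
      rw [List.getElem?_take, List.getElem?_drop] at this
      · rw [show i + (j - i - 1) = j - 1 by omega, if_pos (by omega : j - i - 1 < j - i)] at this
        exact this
    · rintro ⟨hij', hlast⟩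
      have : ((cs.drop i).take (j - i)).getLast? = some ']' := by
        rw [List.getLast?_eq_getElem?, hlen, List.getElem?_take, List.getElem?_drop]
        rw [show i + (j - i - 1) = j - 1 by omega]
        simp [hlast]; omega
      obtain ⟨l', hl'⟩ := List.getLast?_eq_some_iff.mp this
      exact ⟨l', hl'.symm⟩
  rw [hsuf, List.prefix_iff_eq_take]
  constructor
  · rintro ⟨hpre, h1, h2⟩
    have hPle : P.length ≤ j - i := by
      have := congrArg List.length hpre; simp [hlen] at this; omega
    refine ⟨h1, h2, by omega, ?_⟩
    rw [List.take_take, Nat.min_eq_left hPle] at hpre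
    exact hpre.symm
  · rintro ⟨h1, h2, h3, h4⟩
    refine ⟨?_, h1, h2⟩
    rw [List.take_take, Nat.min_eq_left (by omega)]
    exact h4.symm

-- A's `sub[m:-1]` on the window substring is the next window
theorem pvSliceWindow (cs : List Char) (i j m : Nat) (hm : i + m ≤ j) (hij : i < j)
    (hj : j ≤ cs.length) :
    PySem.List.slice ((cs.drop i).take (j - i)) (some (m : Int)) (some (-1))
      = (cs.drop (i + m)).take ((j - 1) - (i + m)) := by
  have hlen : ((cs.drop i).take (j - i)).length = j - i := by
    simp [List.length_take, List.length_drop]; omega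
  simp only [PySem.List.slice, hlen, PySem.List.clampIdx_neg_one, PySem.List.clampIdx_natCast]
  rw [Nat.min_eq_left (by omega)]
  rw [List.drop_take, List.take_take, List.drop_drop, Nat.min_eq_left (by omega)]
  congr 1
  omega

-- if the window starts with pattern P (whose last char is '[') and ends with ']', the closing
-- bracket lies strictly after the pattern
theorem pvGapLemma (cs : List Char) (i j m : Nat) (P : List Char)
    (hlast : P[m-1]? = some '[') (hm0 : 0 < m)
    (h2 : cs[j-1]? = some ']') (h3 : i + m ≤ j) (h4 : (cs.drop i).take m = P) :
    i + m < j := by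
  rcases Nat.lt_or_ge (i + m) j with h | h
  · exact h
  have hjm : j = i + m := by omega
  have : ((cs.drop i).take m)[m-1]? = some '[' := by rw [h4]; exact hlast
  rw [List.getElem?_take, if_pos (by omega), List.getElem?_drop] at this
  rw [show i + (m - 1) = j - 1 by omega, h2] at this
  simp at this

theorem ofList_beq (a b : List Char) : (String.ofList a == String.ofList b) = (a == b) := by
  by_cases h : a = b
  · subst h; simp
  · have : String.ofList a ≠ String.ofList b := fun hc => h (by simpa using congrArg String.toList hc)
    simp [h, this]

theorem get?_map_ofList (l : List (List Char × List Char)) (k : List Char) :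
    PySem.Dict.get? ⟨l.map (fun p => (String.ofList p.1, String.ofList p.2))⟩ (String.ofList k)
      = (PySem.Dict.get? (⟨l⟩ : PySem.Dict (List Char) (List Char)) k).map String.ofList := by
  induction l with
  | nil => rfl
  | cons p rest ih =>
    obtain ⟨k1, v1⟩ := p
    simp only [List.map_cons, PySem.Dict.get?_mk_cons, ofList_beq]
    by_cases h : k1 == k
    · simp [h]
    · simp [h, ih]

-- the String-keyed mapping of B agrees with the char-list mapping of A
theorem pvGetDBridge (core : List Char) :
    PySem.Dict.getD pyMappingB (String.ofList core) (String.ofList core)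
      = String.ofList (PySem.Dict.getD pyMappingA core core) := by
  have h : pyMappingB = ⟨pyMappingA.items.map (fun p => (String.ofList p.1, String.ofList p.2))⟩ := by
    decide
  show (PySem.Dict.get? pyMappingB (String.ofList core)).getD (String.ofList core)
      = String.ofList ((PySem.Dict.get? pyMappingA core).getD core)
  rw [h, show pyMappingA = ⟨pyMappingA.items⟩ from rfl, get?_map_ofList]
  cases PySem.Dict.get? (⟨pyMappingA.items⟩ : PySem.Dict (List Char) (List Char)) core <;> simp

theorem pvBScan_spec (k : Nat) : ∀ (cs : List Char) (i j : Nat) (pre : List Char),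
    i ≤ j → j ≤ cs.length → j - i ≤ k →
    (pvBScan cs i j pre).1
        ++ PySem.Dict.getD pyMappingA (pvBScan cs i j pre).2 (pvBScan cs i j pre).2
      = pre ++ pvARec ((cs.drop i).take (j - i)) := by
  induction k with
  | zero =>
    intro cs i j pre hij hj hk
    have hji : j = i := by omega
    subst hji
    rw [pvBScan, if_neg (fun h => absurd h.1 (by omega)),
        if_neg (fun h => absurd h.1 (by omega))]
    simp only [Nat.sub_self, List.take_zero]
    rw [pvARec, if_neg (by decide), if_neg (by decide)]
  | succ k ih =>
    intro cs i j pre hij hj hk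
    by_cases hB1 : i < j ∧ cs[j-1]? = some ']' ∧ i + 9 ≤ j ∧ (cs.drop i).take 9 = "Optional[".toList
    · have hA1 := (pvWindowCond cs i j "Optional[".toList hij hj).mpr (by simpa using hB1)
      have hgap := pvGapLemma cs i j 9 "Optional[".toList rfl (by omega) hB1.2.1 hB1.2.2.1 hB1.2.2.2
      rw [pvBScan, if_pos hB1]
      rw [pvARec, if_pos hA1]
      have hsl := pvSliceWindow cs i j 9 hB1.2.2.1 hB1.1 hj
      norm_num at hsl
      rw [hsl]
      rw [ih cs (i + 9) (j - 1) (pre ++ "Option ".toList) (by omega) (by omega) (by omega)]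
      simp
    · by_cases hB2 : i < j ∧ cs[j-1]? = some ']' ∧ i + 5 ≤ j ∧ (cs.drop i).take 5 = "List[".toList
      · have hA2 := (pvWindowCond cs i j "List[".toList hij hj).mpr (by simpa using hB2)
        have hA1 : ¬ ((PySem.Chars.startswith ((cs.drop i).take (j - i)) "Optional[".toList
            && PySem.Chars.endswith ((cs.drop i).take (j - i)) "]".toList) = true) := by
          intro h
          exact hB1 (by simpa using (pvWindowCond cs i j "Optional[".toList hij hj).mp h)
        have hgap := pvGapLemma cs i j 5 "List[".toList rfl (by omega) hB2.2.1 hB2.2.2.1 hB2.2.2.2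
        rw [pvBScan, if_neg hB1, if_pos hB2]
        rw [pvARec, if_neg hA1, if_pos hA2]
        have hsl := pvSliceWindow cs i j 5 hB2.2.2.1 hB2.1 hj
        norm_num at hsl
        rw [hsl]
        rw [ih cs (i + 5) (j - 1) (pre ++ "List ".toList) (by omega) (by omega) (by omega)]
        simp
      · have hA1 : ¬ ((PySem.Chars.startswith ((cs.drop i).take (j - i)) "Optional[".toList
            && PySem.Chars.endswith ((cs.drop i).take (j - i)) "]".toList) = true) := by
          intro h
          exact hB1 (by simpa using (pvWindowCond cs i j "Optional[".toList hij hj).mp h)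
        have hA2 : ¬ ((PySem.Chars.startswith ((cs.drop i).take (j - i)) "List[".toList
            && PySem.Chars.endswith ((cs.drop i).take (j - i)) "]".toList) = true) := by
          intro h
          exact hB2 (by simpa using (pvWindowCond cs i j "List[".toList hij hj).mp h)
        rw [pvBScan, if_neg hB1, if_neg hB2]
        rw [pvARec, if_neg hA1, if_neg hA2]

-- ===== VERDICT (by name: the statement is the Claim_ definition above) =====
theorem python_type_to_lean_py_spec : Claim_equal_python_type_to_lean_py := by
  intro s _
  unfold Spec_python_type_to_lean_py python_type_to_lean_py python_type_to_lean_py_alt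
  show String.ofList (pvARec s.toList)
      = String.ofList (pvBScan s.toList 0 s.toList.length []).1
        ++ PySem.Dict.getD pyMappingB (String.ofList (pvBScan s.toList 0 s.toList.length []).2)
            (String.ofList (pvBScan s.toList 0 s.toList.length []).2)
  rw [pvGetDBridge]
  have h := pvBScan_spec s.toList.length s.toList 0 s.toList.length []
    (Nat.zero_le _) le_rfl (by omega)
  simp only [List.drop_zero, Nat.sub_zero, List.take_length, List.nil_append] at h
  simp [← h]
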